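-- pv_equiv track=rewrite | github.com/nkossally/number-theory | binary_math.py | subtract_binary_strings
-- ===== SOURCE A (Python) =====
-- LENGTH = 8
--
-- BORROW = "borrow"
--
-- CANNOT_BORROW = "cannot borrow"
--
-- NEGATIVE_RESULT = "subtraction result is negative"
--
-- def subtract_two_bits(a: str, b: str):
--     if a == '0' and b == '0':
--         return '0'
--     if a == '0' and b == '1':
--         return BORROW
--     if a == '1' and b == '0':
--         return '1'
--     if a == '1' and b == '1':
--         return '0'
--
-- def handle_borrow(a: str, b: str, idx):
--     cpy = a
--     for i in range(idx- 1, -1, -1):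
--         if cpy[i] == '1':
--             cpy = cpy[:i] + '0' + cpy[i+1:]
--             cpy = cpy[:idx] + '1' + cpy[idx+1:]
--             return cpy
--         else:
--             cpy = cpy[:i] + '1' + cpy[i+1:]
--     return CANNOT_BORROW
--
-- def subtract_binary_strings(a: str, b: str) -> str:
--     a = a.zfill(LENGTH)
--     b = b.zfill(LENGTH)
--
--     for i in range(LENGTH - 1, -1, -1):
--
--         diff = subtract_two_bits(a[i], b[i])
--
--         if diff == BORROW:
--             a = handle_borrow(a, b, i)
--             if a == CANNOT_BORROW:
--                 return NEGATIVE_RESULT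
--         else:
--             a = a[:i] + diff + a[i+1:]
--
--     return a
-- ===== SOURCE B (Python) =====
-- LENGTH = 8
-- NEGATIVE_RESULT = "subtraction result is negative"
-- def subtract_binary_strings(a, b):
--     a_l = list(a.zfill(LENGTH))
--     b_p = b.zfill(LENGTH)
--     borrow = 0
--     for i in range(LENGTH - 1, -1, -1):
--         d = int(a_l[i]) - int(b_p[i]) - borrow
--         if d < 0:
--             if '1' not in a_l[:i]:
--                 return NEGATIVE_RESULT
--             a_l[i] = str(d + 2)
--             borrow = 1
--         else:
--             a_l[i] = str(d)
--             borrow = 0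
--     return "".join(a_l)
-- ===== Notes on version B (the rewrite author's own statement) =====
-- stated objective: simpler
-- what changed: Replaces A's per-bit subtract_two_bits dispatch plus the backward-rescanning handle_borrow (which rewrites the string by repeated slicing until it finds a 1 to borrow from) with a single pass keeping a running borrow flag, returning NEGATIVE_RESULT as soon as a borrow is needed with no '1' left to borrow from; no final flag check or string rewriting is needed.
-- outside the precondition, e.g. on subtract_binary_strings('11x01', '010'): A returns '00010111', B raises ValueError
import Mathlib
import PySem

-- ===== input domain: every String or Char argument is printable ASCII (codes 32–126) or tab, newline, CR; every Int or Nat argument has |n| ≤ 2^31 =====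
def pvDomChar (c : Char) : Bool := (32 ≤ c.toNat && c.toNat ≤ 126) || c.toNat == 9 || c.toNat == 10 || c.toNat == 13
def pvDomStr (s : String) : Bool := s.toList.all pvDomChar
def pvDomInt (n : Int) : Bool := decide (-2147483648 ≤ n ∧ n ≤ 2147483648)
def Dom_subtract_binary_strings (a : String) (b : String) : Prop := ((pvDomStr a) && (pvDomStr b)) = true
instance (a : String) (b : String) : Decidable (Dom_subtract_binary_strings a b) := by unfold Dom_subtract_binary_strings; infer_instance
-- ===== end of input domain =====

-- B replaces A's backward-scanning `handle_borrow` string rewriting with a single running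
-- borrow flag maintained in one pass (objective: simpler; same small constant cost).

-- ===== PORT A =====
def pvBORROW : String := "borrow"

def pvNEGATIVE_RESULT : String := "subtraction result is negative"

-- subtract_two_bits: Python falls off the end (returns None) when a bit is not '0'/'1' → none here
def subtract_two_bits (x : Char) (y : Char) : Option String :=
  if x = '0' ∧ y = '0' then some "0"
  else if x = '0' ∧ y = '1' then some pvBORROW
  else if x = '1' ∧ y = '0' then some "1"
  else if x = '1' ∧ y = '1' then some "0"
  else none

-- the `for i in range(idx-1, -1, -1)` loop of handle_borrow, as structural recursion on i;
-- `cpy[:i] + c + cpy[i+1:]` is ported literally as take/append/drop; none = CANNOT_BORROW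
def pvHbGo (idx : Nat) : Nat → List Char → Option (List Char)
  | 0, _ => none
  | i+1, cpy =>
    if cpy.getD i ' ' = '1' then
      let c1 := cpy.take i ++ ['0'] ++ cpy.drop (i+1)
      some (c1.take idx ++ ['1'] ++ c1.drop (idx+1))
    else pvHbGo idx i (cpy.take i ++ ['1'] ++ cpy.drop (i+1))

def handle_borrow (a : List Char) (_b : List Char) (idx : Nat) : Option (List Char) :=
  pvHbGo idx idx a

-- the main `for i in range(LENGTH-1, -1, -1)` loop; every index is < 8 ≤ length after zfill,
-- so `a[i]` is ported as getD (the default is never read); none = Python's TypeError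
def pvLoopA (b8 : List Char) : Nat → List Char → Option String
  | 0, a => some (String.ofList a)
  | i+1, a =>
    match subtract_two_bits (a.getD i ' ') (b8.getD i ' ') with
    | none => none
    | some d =>
      if d = pvBORROW then
        match handle_borrow a b8 i with
        | none => some pvNEGATIVE_RESULT
        | some a' => pvLoopA b8 i a'
      else pvLoopA b8 i (a.take i ++ d.toList ++ a.drop (i+1))

def subtract_binary_strings (a : String) (b : String) : String :=
  (pvLoopA (PySem.Chars.zfill b.toList 8) 8 (PySem.Chars.zfill a.toList 8)).getD ""

-- ===== PORT B =====
def pvNEGATIVE_RESULT_B : String := "subtraction result is negative"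

-- Source B's single loop: a_l is the Python list of 1-char strings, b_p the zfilled string;
-- int(…) is PySem.Int.ofStr? (none = ValueError), str(…) is PySem.Int.toStr,
-- `'1' not in a_l[:i]` is the contains test on the take-prefix
def pvLoopB (bp : List Char) : Nat → List String → Int → Option String
  | 0, aL, _ => some (PySem.Str.join "" aL)
  | i+1, aL, bor =>
    match PySem.Int.ofStr? (aL.getD i ""), PySem.Int.ofStr? (String.ofList [bp.getD i ' ']) with
    | some x, some y =>
      let d := x - y - bor
      if d < 0 then
        if "1" ∉ aL.take i then some pvNEGATIVE_RESULT_B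
        else pvLoopB bp i (aL.set i (PySem.Int.toStr (d + 2))) 1
      else pvLoopB bp i (aL.set i (PySem.Int.toStr d)) 0
    | _, _ => none

def subtract_binary_strings_alt (a : String) (b : String) : String :=
  let aL := (PySem.Chars.zfill a.toList 8).map (fun c => String.ofList [c])
  let bp := PySem.Chars.zfill b.toList 8
  match pvLoopB bp 8 aL 0 with
  | some s => s
  | none => ""   -- unreachable under Pre_ (Python raised)

-- ===== PRECONDITION & SPEC =====
def pvBin (c : Char) : Bool := c == '0' || c == '1'

-- Pre_ admits the inputs on which every character A actually inspects is a binary digit: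
-- either both zero-filled 8-char prefixes are fully binary, or the subtraction visibly goes
-- negative at position i after a borrow-free binary suffix while a has no '1' left of i (A
-- then exits with NEGATIVE_RESULT without reading the remaining characters).  Outside Pre_
-- A usually raises a TypeError; on the rare excluded inputs where a borrow chain overwrites
-- an offending character before it is read, A still returns (see the cite in the claim).
def Pre_subtract_binary_strings (a : String) (b : String) : Prop :=
  ((PySem.Chars.zfill a.toList 8).take 8).all pvBin = true ∧
    ((PySem.Chars.zfill b.toList 8).take 8).all pvBin = true ∨
  ∃ i < 8, ((PySem.Chars.zfill a.toList 8).take 8).getD i ' ' = '0' ∧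
    ((PySem.Chars.zfill b.toList 8).take 8).getD i ' ' = '1' ∧
    (∀ j < i, ((PySem.Chars.zfill a.toList 8).take 8).getD j ' ' ≠ '1') ∧
    (∀ j < 8, i < j →
      (((PySem.Chars.zfill a.toList 8).take 8).getD j ' ' = '1' ∧
        (((PySem.Chars.zfill b.toList 8).take 8).getD j ' ' = '0' ∨
         ((PySem.Chars.zfill b.toList 8).take 8).getD j ' ' = '1')) ∨
      (((PySem.Chars.zfill a.toList 8).take 8).getD j ' ' = '0' ∧
        ((PySem.Chars.zfill b.toList 8).take 8).getD j ' ' = '0'))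
instance (a : String) (b : String) : Decidable (Pre_subtract_binary_strings a b) := by
  unfold Pre_subtract_binary_strings; infer_instance

def pvWitness_subtract_binary_strings : String × String := ("00001010", "00000011")

def Spec_subtract_binary_strings (a : String) (b : String) (out : String) : Prop := out = subtract_binary_strings_alt a b
instance (a : String) (b : String) (out : String) : Decidable (Spec_subtract_binary_strings a b out) := by unfold Spec_subtract_binary_strings; infer_instance

-- ===== CLAIM (what is proved, stated in full; the proofs are below) =====
def Claim_equal_subtract_binary_strings : Prop := ∀ (a : String) (b : String), Dom_subtract_binary_strings a b → Pre_subtract_binary_strings a b → Spec_subtract_binary_strings a b (subtract_binary_strings a b)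

-- ===== LEMMAS AND PROOFS =====

-- proof-side shadows: bit characters, their numeric value, and a char-level copy of B's loop
def pvBits (l : List Char) : Prop := ∀ c ∈ l, c = '0' ∨ c = '1'

def pvCInt (c : Char) : Int := if c = '1' then 1 else 0

def pvCChr (k : Int) : Char := if k = 1 then '1' else '0'

-- binary decrement of the length-n prefix (none = the prefix has no '1' to borrow from)
def pvDec : Nat → List Char → Option (List Char)
  | 0, _ => none
  | n+1, l => if l.getD n ' ' = '1' then some (l.set n '0') else pvDec n (l.set n '1')

def pvLoopC (bp : List Char) : Nat → List Char → Int → String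
  | 0, l, _ => String.ofList l
  | i+1, l, bor =>
    let d := pvCInt (l.getD i ' ') - pvCInt (bp.getD i ' ') - bor
    if d < 0 then
      if '1' ∉ l.take i then "subtraction result is negative"
      else pvLoopC bp i (l.set i (pvCChr (d + 2))) 1
    else pvLoopC bp i (l.set i (pvCChr d)) 0

lemma pvSplice (l : List Char) (i : Nat) (c : Char) (h : i < l.length) :
    l.take i ++ [c] ++ l.drop (i+1) = l.set i c := by
  rw [List.set_eq_take_cons_drop c h]; simp

lemma pvSplice' (l : List Char) (i : Nat) (c : Char) (h : i < l.length) :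
    l.take i ++ c :: l.drop (i+1) = l.set i c := by
  rw [List.set_eq_take_cons_drop c h]

lemma pvGetD_set_ne (l : List Char) {i j : Nat} (c : Char) (h : i ≠ j) :
    (l.set i c).getD j ' ' = l.getD j ' ' := by
  simp [List.getD, List.getElem?_set_ne h]

lemma pvGetD_set_self (l : List Char) {i : Nat} (c : Char) (h : i < l.length) :
    (l.set i c).getD i ' ' = c := by
  simp [List.getD, h]

-- handle_borrow's scan is decrement-of-prefix followed by setting position idx to '1'
lemma pvHbGo_eq_dec (idx : Nat) : ∀ (i : Nat) (cpy : List Char), idx < cpy.length → i ≤ idx →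
    pvHbGo idx i cpy = (pvDec i cpy).map (·.set idx '1') := by
  intro i
  induction i with
  | zero => intro cpy _ _; simp [pvHbGo, pvDec]
  | succ n ih =>
    intro cpy hlen hle
    have hn : n < cpy.length := by omega
    rw [pvHbGo, pvDec]
    split
    · simp [pvSplice _ _ _ hn,
        pvSplice (cpy.set n '0') idx '1' (by rw [List.length_set]; omega)]
    · rw [pvSplice _ _ _ hn, ih (cpy.set n '1') (by rw [List.length_set]; omega) (by omega)]

lemma pvDec_set_high : ∀ (n j : Nat) (l : List Char) (c : Char), n ≤ j →
    pvDec n (l.set j c) = (pvDec n l).map (·.set j c) := by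
  intro n
  induction n with
  | zero => intro j l c _; simp [pvDec]
  | succ m ih =>
    intro j l c hle
    rw [pvDec, pvDec, pvGetD_set_ne _ _ (by omega : j ≠ m)]
    split
    · rw [List.set_comm _ _ (by omega : j ≠ m)]; rfl
    · rw [List.set_comm _ _ (by omega : j ≠ m), ih j _ c (by omega)]

lemma pvDec_some_length : ∀ (n : Nat) (l m : List Char), pvDec n l = some m → m.length = l.length := by
  intro n
  induction n with
  | zero => intro l m h; simp [pvDec] at h
  | succ k ih =>
    intro l m h
    rw [pvDec] at h
    split at h
    · cases h; simp
    · have := ih _ _ h; simpa using this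

lemma pvDec_none_no_one : ∀ (n : Nat) (l : List Char), pvDec n l = none →
    ∀ j < n, l.getD j ' ' ≠ '1' := by
  intro n
  induction n with
  | zero => intro l _ j hj; omega
  | succ k ih =>
    intro l h j hj
    rw [pvDec] at h
    split at h
    · cases h
    · rename_i hnot1
      rcases Nat.lt_or_ge j k with hjk | hjk
      · have := ih _ h j hjk
        rwa [pvGetD_set_ne _ _ (by omega : k ≠ j)] at this
      · have : j = k := by omega
        subst this; exact hnot1

lemma pvDec_none_of_no_one : ∀ (n : Nat) (l : List Char),
    (∀ j < n, l.getD j ' ' ≠ '1') → pvDec n l = none := by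
  intro n
  induction n with
  | zero => intro l _; rfl
  | succ k ih =>
    intro l h
    rw [pvDec, if_neg (h k (by omega))]
    exact ih _ (fun j hj => by
      rw [pvGetD_set_ne _ _ (by omega : k ≠ j)]; exact h j (by omega))

lemma pvNotMem_of_no_one {l : List Char} {n : Nat}
    (h : ∀ j < n, l.getD j ' ' ≠ '1') : '1' ∉ l.take n := by
  intro hc
  obtain ⟨j, hjn, hget⟩ := List.mem_take_iff_getElem.mp hc
  have hjl : j < l.length := (Nat.lt_min.mp hjn).2
  exact h j (by omega) (by rw [List.getD_eq_getElem l ' ' hjl]; exact hget)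

lemma pvNoOne_of_not_mem {l : List Char} {n : Nat}
    (h : '1' ∉ l.take n) : ∀ j < n, l.getD j ' ' ≠ '1' := by
  intro j hj hone
  rcases Nat.lt_or_ge j l.length with hjl | hjl
  · exact h (List.mem_take_iff_getElem.mpr
      ⟨j, by omega, by rw [List.getD_eq_getElem l ' ' hjl] at hone; exact hone⟩)
  · rw [List.getD_eq_default] at hone
    · exact absurd hone (by decide)
    · omega

lemma pvMem_of_dec_some {n : Nat} {l m : List Char}
    (hd : pvDec n l = some m) : '1' ∈ l.take n := by
  by_contra hc
  rw [pvDec_none_of_no_one n l (pvNoOne_of_not_mem hc)] at hd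
  cases hd

lemma pvBits_take_le {l : List Char} {m n : Nat} (h : m ≤ n) (hb : pvBits (l.take n)) :
    pvBits (l.take m) := by
  intro c hc
  exact hb c (List.IsPrefix.mem hc (List.take_prefix_take_left h))

lemma pvBits_getD {l : List Char} {n i : Nat} (hb : pvBits (l.take n)) (hi : i < n)
    (hlen : i < l.length) : l.getD i ' ' = '0' ∨ l.getD i ' ' = '1' := by
  rw [List.getD_eq_getElem l ' ' hlen]
  apply hb
  rw [List.mem_take_iff_getElem]
  exact ⟨i, by omega, by simp⟩

lemma pvBits_set {l : List Char} {n : Nat} (c : Char) (hb : pvBits (l.take n)) :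
    pvBits ((l.set n c).take n) := by
  rwa [List.take_set_of_le (le_refl n)]

-- THE INVARIANT: with positions ≥ n already processed, A's current string equals B's original
-- string when no borrow is pending, and its decremented-prefix form when one is.
lemma pvMain (bp : List Char) (hbp : pvBits (bp.take 8)) (hbpl : 8 ≤ bp.length) :
    ∀ (n : Nat), n ≤ 8 → ∀ (aB : List Char), 8 ≤ aB.length → pvBits (aB.take n) →
    ∀ (bor : Int) (aA : List Char),
    ((bor = 0 ∧ aA = aB) ∨ (bor = 1 ∧ pvDec n aB = some aA)) →
    pvLoopA bp n aA = some (pvLoopC bp n aB bor) := by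
  have tl0 : ("0" : String).toList = ['0'] := by decide
  have tl1 : ("1" : String).toList = ['1'] := by decide
  intro n
  induction n with
  | zero =>
    intro _ aB _ _ bor aA hrel
    rcases hrel with ⟨_, rfl⟩ | ⟨_, hdec⟩
    · simp [pvLoopA, pvLoopC]
    · simp [pvDec] at hdec
  | succ n ih =>
    intro _ aB hlen hbits bor aA hrel
    have hnlt : n < aB.length := by omega
    have hxB := pvBits_getD hbits (by omega) hnlt
    have hyB := pvBits_getD hbp (by omega) (by omega : n < bp.length)
    have hbitsn : pvBits (aB.take n) := pvBits_take_le (by omega) hbits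
    have hbn8 : (8:Nat) ≤ (aB.set n '1').length := by rw [List.length_set]; omega
    rcases hrel with ⟨rfl, rfl⟩ | ⟨rfl, hdec⟩
    · -- no pending borrow: A's string is B's string (named aA here)
      rw [pvLoopA, pvLoopC]
      rcases hxB with hx | hx <;> rcases hyB with hy | hy <;> simp only [hx, hy]
      · -- '0' '0'
        simp [subtract_two_bits, pvBORROW, pvCInt, pvCChr, tl0]
        rw [pvSplice' _ _ _ hnlt]
        exact ih (by omega) _ (by simpa using hlen) (pvBits_set _ hbitsn) 0 _
          (Or.inl ⟨rfl, rfl⟩)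
      · -- '0' '1' : borrow
        simp [subtract_two_bits, pvBORROW, pvCInt, pvCChr, handle_borrow]
        rw [pvHbGo_eq_dec n n aA hnlt (le_refl n)]
        cases hdn : pvDec n aA with
        | none =>
          simp only [Option.map_none]
          rw [if_neg (pvNotMem_of_no_one (pvDec_none_no_one n aA hdn))]
          simp [pvNEGATIVE_RESULT]
        | some a0 =>
          simp only [Option.map_some]
          rw [if_pos (pvMem_of_dec_some hdn)]
          have := ih (by omega) (aA.set n '1') hbn8 (pvBits_set _ hbitsn) 1 (a0.set n '1')
            (Or.inr ⟨rfl, by rw [pvDec_set_high n n aA '1' (le_refl n), hdn]; rfl⟩)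
          simpa using this
      · -- '1' '0'
        simp [subtract_two_bits, pvBORROW, pvCInt, pvCChr, tl1]
        rw [pvSplice' _ _ _ hnlt]
        exact ih (by omega) _ (by simpa using hlen) (pvBits_set _ hbitsn) 0 _
          (Or.inl ⟨rfl, rfl⟩)
      · -- '1' '1'
        simp [subtract_two_bits, pvBORROW, pvCInt, pvCChr, tl0]
        rw [pvSplice' _ _ _ hnlt]
        exact ih (by omega) _ (by simpa using hlen) (pvBits_set _ hbitsn) 0 _
          (Or.inl ⟨rfl, rfl⟩)
    · -- pending borrow: pvDec (n+1) aB = some aA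
      rw [pvDec] at hdec
      rw [pvLoopA, pvLoopC]
      by_cases hx1 : aB.getD n ' ' = '1'
      · -- aB[n] = '1' → aA = aB.set n '0', the borrow is absorbed here
        rw [if_pos hx1] at hdec
        have haA : aA = aB.set n '0' := by cases hdec; rfl
        have haAn : aA.getD n ' ' = '0' := by rw [haA]; exact pvGetD_set_self _ _ hnlt
        have haAlen : n < aA.length := by rw [haA, List.length_set]; omega
        rcases hyB with hy | hy <;> simp only [hx1, hy, haAn]
        · -- y = '0' : result bit 0, borrow cleared
          simp [subtract_two_bits, pvBORROW, pvCInt, pvCChr, tl0]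
          rw [pvSplice' _ _ _ haAlen, haA, List.set_set]
          exact ih (by omega) _ (by simpa using hlen) (pvBits_set _ hbitsn) 0 _
            (Or.inl ⟨rfl, rfl⟩)
        · -- y = '1' : another borrow
          simp [subtract_two_bits, pvBORROW, pvCInt, pvCChr, handle_borrow]
          rw [pvHbGo_eq_dec n n aA (by omega) (le_refl n), haA,
            pvDec_set_high n n aB '0' (le_refl n)]
          cases hdn : pvDec n aB with
          | none =>
            simp only [Option.map_none]
            rw [if_neg (pvNotMem_of_no_one (pvDec_none_no_one n aB hdn))]
            simp [pvNEGATIVE_RESULT]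
          | some a0 =>
            simp only [Option.map_some, List.set_set]
            rw [if_pos (pvMem_of_dec_some hdn)]
            have := ih (by omega) (aB.set n '1') hbn8 (pvBits_set _ hbitsn) 1 (a0.set n '1')
              (Or.inr ⟨rfl, by rw [pvDec_set_high n n aB '1' (le_refl n), hdn]; rfl⟩)
            simpa using this
      · -- aB[n] = '0' → the decrement flipped it to '1' and borrowed further left
        rw [if_neg hx1] at hdec
        have hx0 : aB.getD n ' ' = '0' := by
          rcases hxB with h | h
          · exact h
          · exact absurd h hx1
        rw [pvDec_set_high n n aB '1' (le_refl n)] at hdec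
        cases hdn : pvDec n aB with
        | none => rw [hdn] at hdec; cases hdec
        | some a0 =>
          rw [hdn] at hdec
          have haA : aA = a0.set n '1' := by cases hdec; rfl
          have ha0len : a0.length = aB.length := pvDec_some_length n aB a0 hdn
          have haAn : aA.getD n ' ' = '1' := by
            rw [haA]; exact pvGetD_set_self _ _ (by omega)
          have haAlen : n < aA.length := by rw [haA, List.length_set]; omega
          have hct : '1' ∈ aB.take n := pvMem_of_dec_some hdn
          rcases hyB with hy | hy <;> simp only [hx0, hy, haAn]
          · -- y = '0' : A writes '1', the borrow persists
            simp [subtract_two_bits, pvBORROW, pvCInt, pvCChr, tl1, hct]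
            rw [pvSplice' _ _ _ haAlen, haA, List.set_set]
            exact ih (by omega) (aB.set n '1') hbn8 (pvBits_set _ hbitsn) 1 (a0.set n '1')
              (Or.inr ⟨rfl, by rw [pvDec_set_high n n aB '1' (le_refl n), hdn]; rfl⟩)
          · -- y = '1' : A writes '0', the borrow persists
            simp [subtract_two_bits, pvBORROW, pvCInt, pvCChr, tl0, hct]
            rw [pvSplice' _ _ _ haAlen, haA, List.set_set]
            exact ih (by omega) (aB.set n '0') (by rw [List.length_set]; omega)
              (pvBits_set _ hbitsn) 1 (a0.set n '0')
              (Or.inr ⟨rfl, by rw [pvDec_set_high n n aB '0' (le_refl n), hdn]; rfl⟩)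

-- NegCert branch of Pre_: a borrow-free binary suffix, then a visible borrow with no '1'
-- left of it — A exits with NEGATIVE_RESULT, and B exits the same way
lemma pvMainNeg (bp : List Char) (i : Nat) :
    ∀ (n : Nat), i < n → n ≤ 8 → ∀ (l : List Char), 8 ≤ l.length →
    l.getD i ' ' = '0' → bp.getD i ' ' = '1' →
    (∀ j < i, l.getD j ' ' ≠ '1') →
    (∀ j < n, i < j →
      (l.getD j ' ' = '1' ∧ (bp.getD j ' ' = '0' ∨ bp.getD j ' ' = '1')) ∨
      (l.getD j ' ' = '0' ∧ bp.getD j ' ' = '0')) →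
    pvLoopA bp n l = some (pvLoopC bp n l 0) := by
  intro n
  induction n with
  | zero => intro h; omega
  | succ m ih =>
    intro him _ l hlen hai hbi hpre hsuf
    have hmlt : m < l.length := by omega
    rw [pvLoopA, pvLoopC]
    rcases Nat.lt_or_ge i m with hi | hi
    · -- still in the borrow-free suffix
      rcases hsuf m (by omega) hi with ⟨hx, hy | hy⟩ | ⟨hx, hy⟩ <;>
        simp only [hx, hy] <;> simp [subtract_two_bits, pvBORROW, pvCInt, pvCChr,
          (by decide : ("0" : String).toList = ['0']), (by decide : ("1" : String).toList = ['1'])] <;>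
        rw [pvSplice' _ _ _ hmlt] <;>
        refine ih (by omega) (by omega) _ (by rw [List.length_set]; omega)
          (by rw [pvGetD_set_ne _ _ (by omega : m ≠ i)]; exact hai) hbi
          (fun j hj => by rw [pvGetD_set_ne _ _ (by omega : m ≠ j)]; exact hpre j hj)
          (fun j hj hij => by rw [pvGetD_set_ne _ _ (by omega : m ≠ j)]; exact hsuf j (by omega) hij)
    · -- i = m : the visible borrow with nothing to borrow from
      have him' : i = m := by omega
      subst him'
      simp only [hai, hbi]
      simp [subtract_two_bits, pvBORROW, pvCInt, pvCChr, handle_borrow]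
      rw [pvHbGo_eq_dec i i l hmlt (le_refl i), pvDec_none_of_no_one i l hpre]
      rw [if_neg (pvNotMem_of_no_one hpre)]
      simp [pvNEGATIVE_RESULT]

-- B's loop over 1-char strings mirrors the char-level shadow loop
lemma pvSingOne (c : Char) (h : c = '0' ∨ c = '1') :
    PySem.Int.ofStr? (String.ofList [c]) = some (pvCInt c) := by
  rcases h with rfl | rfl <;> decide

lemma pvMemMap (l : List Char) (k : Nat) :
    ("1" ∈ (l.map (fun c => String.ofList [c])).take k) ↔ ('1' ∈ l.take k) := by
  rw [← List.map_take]
  constructor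
  · intro h
    obtain ⟨c, hc, he⟩ := List.mem_map.mp h
    have : c = '1' := by
      have := congrArg String.toList he
      simpa using this
    rwa [this] at hc
  · intro h
    exact List.mem_map.mpr ⟨'1', h, rfl⟩

lemma pvGetD_map_sing (l : List Char) {k : Nat} (hk : k < l.length) :
    (l.map (fun c => String.ofList [c])).getD k "" = String.ofList [l.getD k ' '] := by
  rw [List.getD_eq_getElem _ _ (by simpa using hk), List.getD_eq_getElem _ _ hk]
  simp

lemma pvJoinSing (l : List Char) :
    PySem.Str.join "" (l.map (fun c => String.ofList [c])) = String.ofList l := by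
  apply String.toList_inj.mp
  rw [PySem.Str.toList_join]
  simp only [List.map_map, String.toList_ofList]
  have : (String.toList ∘ fun c => String.ofList [c]) = fun c => [c] := by
    funext c; simp
  rw [this]
  simp [PySem.Chars.join_nil_singletons l]

lemma pvBC (bp : List Char) (hbp : pvBits (bp.take 8)) (hbpl : 8 ≤ bp.length) :
    ∀ (n : Nat), n ≤ 8 → ∀ (l : List Char), 8 ≤ l.length → pvBits (l.take n) →
    ∀ (bor : Int), (bor = 0 ∨ bor = 1) →
    pvLoopB bp n (l.map (fun c => String.ofList [c])) bor = some (pvLoopC bp n l bor) := by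
  intro n
  induction n with
  | zero => intro _ l _ _ bor _; simp [pvLoopB, pvLoopC, pvJoinSing]
  | succ k ih =>
    intro hk l hlen hbits bor hbor
    have hklt : k < l.length := by omega
    have hxB := pvBits_getD hbits (by omega) hklt
    have hyB := pvBits_getD hbp (by omega) (by omega : k < bp.length)
    have hbitsk : pvBits (l.take k) := pvBits_take_le (by omega) hbits
    rw [pvLoopB, pvLoopC, pvGetD_map_sing l hklt, pvSingOne _ hxB, pvSingOne _ hyB]
    have hstep : ∀ (c : Char) (bor' : Int), (bor' = 0 ∨ bor' = 1) →
        pvLoopB bp k ((l.map (fun c => String.ofList [c])).set k (String.ofList [c])) bor'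
          = some (pvLoopC bp k (l.set k c) bor') := by
      intro c bor' hb'
      rw [← List.map_set]
      exact ih (by omega) (l.set k c) (by rw [List.length_set]; omega) (pvBits_set _ hbitsk) bor' hb'
    have hx : pvCInt (l.getD k ' ') = 0 ∨ pvCInt (l.getD k ' ') = 1 := by
      unfold pvCInt; split <;> simp
    have hy' : pvCInt (bp.getD k ' ') = 0 ∨ pvCInt (bp.getD k ' ') = 1 := by
      unfold pvCInt; split <;> simp
    rcases hx with hx | hx <;> rcases hy' with hy2 | hy2 <;> rcases hbor with rfl | rfl <;>
      rw [hx, hy2] <;>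
      norm_num <;>
      first
        | (simp only [(by decide : PySem.Int.toStr 0 = String.ofList ['0']),
             (by decide : PySem.Int.toStr 1 = String.ofList ['1']),
             (by decide : pvCChr 0 = '0'), (by decide : pvCChr 1 = '1')]
           first
             | exact hstep '0' 0 (Or.inl rfl)
             | exact hstep '1' 0 (Or.inl rfl))
        | (by_cases hcc : '1' ∈ l.take k
           · rw [if_pos ((pvMemMap l k).mpr hcc), if_pos hcc]
             simp only [(by decide : PySem.Int.toStr 0 = String.ofList ['0']),
               (by decide : PySem.Int.toStr 1 = String.ofList ['1']),
               (by decide : pvCChr 0 = '0'), (by decide : pvCChr 1 = '1')]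
             first
               | exact hstep '0' 1 (Or.inr rfl)
               | exact hstep '1' 1 (Or.inr rfl)
           · rw [if_neg (fun hm => hcc ((pvMemMap l k).mp hm)), if_neg hcc]
             simp [pvNEGATIVE_RESULT_B])

-- B on the NegCert branch: same borrow-free suffix, same early NEGATIVE_RESULT exit
lemma pvBCNeg (bp : List Char) (i : Nat) :
    ∀ (n : Nat), i < n → n ≤ 8 → ∀ (l : List Char), 8 ≤ l.length →
    l.getD i ' ' = '0' → bp.getD i ' ' = '1' →
    (∀ j < i, l.getD j ' ' ≠ '1') →
    (∀ j < n, i < j →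
      (l.getD j ' ' = '1' ∧ (bp.getD j ' ' = '0' ∨ bp.getD j ' ' = '1')) ∨
      (l.getD j ' ' = '0' ∧ bp.getD j ' ' = '0')) →
    pvLoopB bp n (l.map (fun c => String.ofList [c])) 0 = some (pvLoopC bp n l 0) := by
  intro n
  induction n with
  | zero => intro h; omega
  | succ m ih =>
    intro him _ l hlen hai hbi hpre hsuf
    have hmlt : m < l.length := by omega
    rw [pvLoopB, pvLoopC, pvGetD_map_sing l hmlt]
    rcases Nat.lt_or_ge i m with hi | hi
    · -- borrow-free suffix: both just write the bit
      rcases hsuf m (by omega) hi with ⟨hx, hy | hy⟩ | ⟨hx, hy⟩ <;>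
        rw [hx, hy] <;>
        norm_num [pvCInt, (by decide : PySem.Int.ofStr? (String.ofList ['0']) = some 0),
          (by decide : PySem.Int.ofStr? (String.ofList ['1']) = some 1)] <;>
        simp only [(by decide : PySem.Int.toStr 0 = String.ofList ['0']),
          (by decide : PySem.Int.toStr 1 = String.ofList ['1']),
          (by decide : pvCChr 0 = '0'),
          ← List.map_set] <;>
        refine ih (by omega) (by omega) _ (by rw [List.length_set]; omega)
          (by rw [pvGetD_set_ne _ _ (by omega : m ≠ i)]; exact hai) hbi
          (fun j hj => by rw [pvGetD_set_ne _ _ (by omega : m ≠ j)]; exact hpre j hj)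
          (fun j hj hij => by rw [pvGetD_set_ne _ _ (by omega : m ≠ j)]; exact hsuf j (by omega) hij)
    · -- i = m : both exit with NEGATIVE_RESULT
      have him' : i = m := by omega
      subst him'
      rw [hai, hbi]
      norm_num [pvCInt, (by decide : PySem.Int.ofStr? (String.ofList ['0']) = some 0),
        (by decide : PySem.Int.ofStr? (String.ofList ['1']) = some 1)]
      rw [if_neg (fun hm => (pvNotMem_of_no_one hpre) ((pvMemMap l i).mp hm)),
        if_neg (pvNotMem_of_no_one hpre)]
      simp [pvNEGATIVE_RESULT_B]

lemma pvZLen (cs : List Char) : 8 ≤ (PySem.Chars.zfill cs 8).length := by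
  rw [PySem.Chars.length_zfill]
  rw [show Int.toNat 8 = 8 from by decide]
  omega

lemma pvGetD_take8 {z : List Char} {j : Nat} (hj : j < 8) (hlen : 8 ≤ z.length) :
    (z.take 8).getD j ' ' = z.getD j ' ' := by
  rw [List.getD_eq_getElem _ _ (by simp; omega), List.getD_eq_getElem _ _ (by omega)]
  simp

lemma pvPre_bits {l : List Char} (h : l.all pvBin = true) : pvBits l := by
  intro c hc
  rcases (Bool.or_eq_true _ _).mp (List.all_eq_true.mp h c hc) with h1 | h1
  · left; exact eq_of_beq h1
  · right; exact eq_of_beq h1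

-- ===== VERDICT (by name: the statement is the Claim_ definition above) =====
theorem subtract_binary_strings_spec : Claim_equal_subtract_binary_strings := by
  intro a b _ hpre
  unfold Spec_subtract_binary_strings subtract_binary_strings subtract_binary_strings_alt
  dsimp only
  have hlenA := pvZLen a.toList
  have hlenB := pvZLen b.toList
  have hAB : pvLoopA (PySem.Chars.zfill b.toList 8) 8 (PySem.Chars.zfill a.toList 8)
        = some (pvLoopC (PySem.Chars.zfill b.toList 8) 8 (PySem.Chars.zfill a.toList 8) 0)
      ∧ pvLoopB (PySem.Chars.zfill b.toList 8) 8
          ((PySem.Chars.zfill a.toList 8).map (fun c => String.ofList [c])) 0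
        = some (pvLoopC (PySem.Chars.zfill b.toList 8) 8 (PySem.Chars.zfill a.toList 8) 0) := by
    rcases hpre with ⟨ha, hb⟩ | ⟨i, hi, hai, hbi, hpref, hsuf⟩
    · have hba : pvBits ((PySem.Chars.zfill a.toList 8).take 8) := pvPre_bits ha
      have hbb : pvBits ((PySem.Chars.zfill b.toList 8).take 8) := pvPre_bits hb
      exact ⟨pvMain _ hbb hlenB 8 (le_refl 8) _ hlenA hba 0 _ (Or.inl ⟨rfl, rfl⟩),
        pvBC _ hbb hlenB 8 (le_refl 8) _ hlenA hba 0 (Or.inl rfl)⟩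
    · have hai' := (pvGetD_take8 hi hlenA) ▸ hai
      have hbi' := (pvGetD_take8 hi hlenB) ▸ hbi
      have hpref' : ∀ j < i, (PySem.Chars.zfill a.toList 8).getD j ' ' ≠ '1' := by
        intro j hj
        rw [← pvGetD_take8 (by omega : j < 8) hlenA]
        exact hpref j hj
      have hsuf' : ∀ j < 8, i < j →
          ((PySem.Chars.zfill a.toList 8).getD j ' ' = '1' ∧
            ((PySem.Chars.zfill b.toList 8).getD j ' ' = '0' ∨
             (PySem.Chars.zfill b.toList 8).getD j ' ' = '1')) ∨
          ((PySem.Chars.zfill a.toList 8).getD j ' ' = '0' ∧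
            (PySem.Chars.zfill b.toList 8).getD j ' ' = '0') := by
        intro j hj hij
        rcases hsuf j hj hij with ⟨h1, h2⟩ | ⟨h1, h2⟩
        · refine Or.inl ⟨(pvGetD_take8 hj hlenA) ▸ h1, ?_⟩
          rcases h2 with h2 | h2
          · exact Or.inl ((pvGetD_take8 hj hlenB) ▸ h2)
          · exact Or.inr ((pvGetD_take8 hj hlenB) ▸ h2)
        · exact Or.inr ⟨(pvGetD_take8 hj hlenA) ▸ h1, (pvGetD_take8 hj hlenB) ▸ h2⟩
      exact ⟨pvMainNeg _ i 8 hi (le_refl 8) _ hlenA hai' hbi' hpref' hsuf',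
        pvBCNeg _ i 8 hi (le_refl 8) _ hlenA hai' hbi' hpref' hsuf'⟩
  rw [hAB.1, Option.getD_some, hAB.2]
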